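-- pv_equiv track=rewrite | github.com/JamieLandolt/CodeForces | Counting Towers.py | count_towers
-- ===== SOURCE A (Python) =====
-- def count_towers(n, dp):
--     largest = len(dp) - 1
--     if n <= largest:
--         return sum(dp[n])
--
--     for i in range(largest + 1, n + 1):
--         prev = dp[i - 1]
--         non_split = prev[0]
--         split = prev[1]
--         dp.append(((split + 2 * non_split) % (10 ** 9 + 7), (4 * split + non_split) % (10 ** 9 + 7)))
--     return sum(dp[n])
-- ===== SOURCE B (Python) =====
-- def count_towers(n, dp):
--     M = 10 ** 9 + 7
--     largest = len(dp) - 1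
--     if n <= largest:
--         return sum(dp[n])
--     a, b = dp[-1][0], dp[-1][1]
--
--     def mul(x, y):
--         return ((x[0] * y[0] + x[1] * y[2]) % M,
--                 (x[0] * y[1] + x[1] * y[3]) % M,
--                 (x[2] * y[0] + x[3] * y[2]) % M,
--                 (x[2] * y[1] + x[3] * y[3]) % M)
--
--     p = (1, 0, 0, 1)
--     base = (2, 1, 1, 4)
--     k = n - largest
--     while k:
--         if k & 1:
--             p = mul(p, base)
--         base = mul(base, base)
--         k >>= 1
--     return (p[0] * a + p[1] * b) % M + (p[2] * a + p[3] * b) % M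
-- ===== Notes on version B (the rewrite author's own statement) =====
-- stated objective: faster
-- what changed: Replaces the O(n) step-by-step DP loop (appending one row per index) by 2x2 matrix exponentiation of the linear recurrence, computing the n-th state in O(log n) modular matrix multiplications.
import Mathlib
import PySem

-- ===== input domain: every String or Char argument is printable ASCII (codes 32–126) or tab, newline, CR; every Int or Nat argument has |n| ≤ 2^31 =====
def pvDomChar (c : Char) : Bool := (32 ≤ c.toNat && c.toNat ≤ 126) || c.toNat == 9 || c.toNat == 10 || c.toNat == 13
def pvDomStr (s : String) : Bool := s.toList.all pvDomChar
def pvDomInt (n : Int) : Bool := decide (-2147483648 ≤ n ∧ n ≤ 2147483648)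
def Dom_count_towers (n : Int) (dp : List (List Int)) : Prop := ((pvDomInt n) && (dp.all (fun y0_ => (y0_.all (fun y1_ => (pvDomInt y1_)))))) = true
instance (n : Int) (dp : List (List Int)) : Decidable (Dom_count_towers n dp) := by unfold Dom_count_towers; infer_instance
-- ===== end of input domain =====

-- B replaces A's O(n) row-by-row DP loop by 2x2 matrix exponentiation (O(log n)); A mutates dp in
-- place (appends rows) while B does not — the equivalence proved here is about the return value only.

-- ===== PORT A =====
-- loop body of A's for-loop, named as a helper (literal transliteration of the body)
def pvStepRowA (d : List (List Int)) (i : Int) : List (List Int) :=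
  let prev := PySem.List.pyGetD d (i - 1) []
  let non_split := PySem.List.pyGetD prev 0 0
  let split := PySem.List.pyGetD prev 1 0
  d ++ [[PySem.Int.mod (split + 2 * non_split) (10 ^ 9 + 7),
         PySem.Int.mod (4 * split + non_split) (10 ^ 9 + 7)]]

def count_towers (n : Int) (dp : List (List Int)) : Int :=
  let largest : Int := (dp.length : Int) - 1
  if n ≤ largest then
    (PySem.List.pyGetD dp n []).sum
  else
    let dp' := (PySem.List.pyRange (largest + 1) (n + 1) 1).foldl pvStepRowA dp
    (PySem.List.pyGetD dp' n []).sum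

-- ===== PORT B =====
-- Source B's mul helper: 2x2 matrix product with every entry reduced mod 10^9+7
def pvMulMod : Int × Int × Int × Int → Int × Int × Int × Int → Int × Int × Int × Int
  | (x0, x1, x2, x3), (y0, y1, y2, y3) =>
    (PySem.Int.mod (x0 * y0 + x1 * y2) (10 ^ 9 + 7),
     PySem.Int.mod (x0 * y1 + x1 * y3) (10 ^ 9 + 7),
     PySem.Int.mod (x2 * y0 + x3 * y2) (10 ^ 9 + 7),
     PySem.Int.mod (x2 * y1 + x3 * y3) (10 ^ 9 + 7))

-- Source B's `while k:` square-and-multiply loop; k is a Nat since in B k = n - largest > 0,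
-- so Python's `k & 1` is `k % 2 = 1` and `k >>= 1` is `k / 2` exactly.
def pvPowLoop (p b : Int × Int × Int × Int) (k : Nat) : Int × Int × Int × Int :=
  if h : k = 0 then p
  else pvPowLoop (if k % 2 = 1 then pvMulMod p b else p) (pvMulMod b b) (k / 2)
termination_by k
decreasing_by exact Nat.div_lt_self (Nat.pos_of_ne_zero h) (by omega)

def count_towers_alt (n : Int) (dp : List (List Int)) : Int :=
  let largest : Int := (dp.length : Int) - 1
  if n ≤ largest then
    (PySem.List.pyGetD dp n []).sum
  else
    let last := PySem.List.pyGetD dp (-1) []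
    let a := PySem.List.pyGetD last 0 0
    let b := PySem.List.pyGetD last 1 0
    let p := pvPowLoop (1, 0, 0, 1) (2, 1, 1, 4) (n - largest).toNat
    PySem.Int.mod (p.1 * a + p.2.1 * b) (10 ^ 9 + 7) +
      PySem.Int.mod (p.2.2.1 * a + p.2.2.2 * b) (10 ^ 9 + 7)

-- ===== PRECONDITION & SPEC =====
-- Pre_ excludes exactly the inputs where Python A raises: empty dp (dp[-1]/dp[n] IndexError),
-- an index n below -len(dp) in the first branch (IndexError), and a last row shorter than 2
-- when the loop runs (prev[1] IndexError).
def Pre_count_towers (n : Int) (dp : List (List Int)) : Prop :=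
  dp ≠ [] ∧ (n ≤ (dp.length : Int) - 1 → -(dp.length : Int) ≤ n) ∧
    ((dp.length : Int) - 1 < n → 2 ≤ (dp.getLastD []).length)
instance (n : Int) (dp : List (List Int)) : Decidable (Pre_count_towers n dp) := by
  unfold Pre_count_towers; infer_instance
def pvWitness_count_towers : Int × List (List Int) := (4, [[1, 1]])

def Spec_count_towers (n : Int) (dp : List (List Int)) (out : Int) : Prop := out = count_towers_alt n dp
instance (n : Int) (dp : List (List Int)) (out : Int) : Decidable (Spec_count_towers n dp out) := by unfold Spec_count_towers; infer_instance

-- ===== CLAIM (what is proved, stated in full; the proofs are below) =====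
def Claim_equal_count_towers : Prop := ∀ (n : Int) (dp : List (List Int)), Dom_count_towers n dp → Pre_count_towers n dp → Spec_count_towers n dp (count_towers n dp)

-- ===== LEMMAS AND PROOFS =====

-- proof-side vocabulary: everything is mirrored in ZMod (10^9+7)
abbrev pvZP : Type := ZMod 1000000007

def pvCv (v : Int × Int) : pvZP × pvZP := ((v.1 : pvZP), (v.2 : pvZP))
def pvCm : Int × Int × Int × Int → pvZP × pvZP × pvZP × pvZP
  | (x0, x1, x2, x3) => ((x0 : pvZP), (x1 : pvZP), (x2 : pvZP), (x3 : pvZP))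
def pvZMul : pvZP × pvZP × pvZP × pvZP → pvZP × pvZP × pvZP × pvZP → pvZP × pvZP × pvZP × pvZP
  | (x0, x1, x2, x3), (y0, y1, y2, y3) =>
    (x0 * y0 + x1 * y2, x0 * y1 + x1 * y3, x2 * y0 + x3 * y2, x2 * y1 + x3 * y3)
def pvZPow (b : pvZP × pvZP × pvZP × pvZP) : Nat → pvZP × pvZP × pvZP × pvZP
  | 0 => (1, 0, 0, 1)
  | k + 1 => pvZMul b (pvZPow b k)
def pvZApp : pvZP × pvZP × pvZP × pvZP → pvZP × pvZP → pvZP × pvZP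
  | (x0, x1, x2, x3), (a, b) => (x0 * a + x1 * b, x2 * a + x3 * b)
def pvZStep (v : pvZP × pvZP) : pvZP × pvZP := (v.2 + 2 * v.1, 4 * v.2 + v.1)

-- one DP step on the Int side, exactly as A's loop body computes it
def pvSInt (v : Int × Int) : Int × Int :=
  (PySem.Int.mod (v.2 + 2 * v.1) (10 ^ 9 + 7), PySem.Int.mod (4 * v.2 + v.1) (10 ^ 9 + 7))
def pvPairRow (v : Int × Int) : List Int := [v.1, v.2]
def pvReadPair (r : List Int) : Int × Int := (PySem.List.pyGetD r 0 0, PySem.List.pyGetD r 1 0)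

lemma pvCastMod (x : Int) : ((PySem.Int.mod x (10 ^ 9 + 7) : Int) : pvZP) = (x : pvZP) := by
  rw [PySem.Int.mod_eq_emod_of_pos (by norm_num)]
  exact_mod_cast ZMod.intCast_mod x 1000000007

lemma pvModEqOfCast {x y : Int} (h : (x : pvZP) = (y : pvZP)) :
    PySem.Int.mod x (10 ^ 9 + 7) = PySem.Int.mod y (10 ^ 9 + 7) := by
  rw [PySem.Int.mod_eq_emod_of_pos (by norm_num), PySem.Int.mod_eq_emod_of_pos (by norm_num)]
  have hm := (ZMod.intCast_eq_intCast_iff x y 1000000007).mp h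
  exact_mod_cast hm

lemma pvCvSInt (v : Int × Int) : pvCv (pvSInt v) = pvZStep (pvCv v) := by
  obtain ⟨a, b⟩ := v
  simp only [pvCv, pvSInt, pvZStep, Prod.mk.injEq]
  refine ⟨?_, ?_⟩ <;> rw [pvCastMod] <;> push_cast <;> ring

lemma pvCmMul (x y : Int × Int × Int × Int) : pvCm (pvMulMod x y) = pvZMul (pvCm x) (pvCm y) := by
  obtain ⟨x0, x1, x2, x3⟩ := x
  obtain ⟨y0, y1, y2, y3⟩ := y
  simp only [pvCm, pvMulMod, pvZMul, Prod.mk.injEq]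
  refine ⟨?_, ?_, ?_, ?_⟩ <;> rw [pvCastMod] <;> push_cast <;> ring

lemma pvZMulAssoc (x y z : pvZP × pvZP × pvZP × pvZP) :
    pvZMul (pvZMul x y) z = pvZMul x (pvZMul y z) := by
  obtain ⟨x0, x1, x2, x3⟩ := x
  obtain ⟨y0, y1, y2, y3⟩ := y
  obtain ⟨z0, z1, z2, z3⟩ := z
  simp only [pvZMul, Prod.mk.injEq]
  refine ⟨?_, ?_, ?_, ?_⟩ <;> ring

lemma pvZMulOne (x : pvZP × pvZP × pvZP × pvZP) : pvZMul x (1, 0, 0, 1) = x := by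
  obtain ⟨x0, x1, x2, x3⟩ := x
  simp [pvZMul]

lemma pvZMulOne' (x : pvZP × pvZP × pvZP × pvZP) : pvZMul (1, 0, 0, 1) x = x := by
  obtain ⟨x0, x1, x2, x3⟩ := x
  simp [pvZMul]

lemma pvZPowAdd (b : pvZP × pvZP × pvZP × pvZP) (m k : Nat) :
    pvZPow b (m + k) = pvZMul (pvZPow b m) (pvZPow b k) := by
  induction m with
  | zero => simp [pvZPow, pvZMulOne']
  | succ m ih =>
      have : m + 1 + k = (m + k) + 1 := by omega
      rw [this, pvZPow, pvZPow, ih, pvZMulAssoc]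

lemma pvZPowSq (b : pvZP × pvZP × pvZP × pvZP) (m : Nat) :
    pvZPow (pvZMul b b) m = pvZPow b (2 * m) := by
  induction m with
  | zero => simp [pvZPow]
  | succ m ih =>
      have : 2 * (m + 1) = (2 * m) + 1 + 1 := by omega
      rw [pvZPow, ih, this, pvZPow, pvZPow, ← pvZMulAssoc]

lemma pvZPowOne (b : pvZP × pvZP × pvZP × pvZP) : pvZPow b 1 = b := by
  simp only [pvZPow]; exact pvZMulOne b

lemma pvPowLoopInv (p b : Int × Int × Int × Int) (k : Nat) :
    pvCm (pvPowLoop p b k) = pvZMul (pvCm p) (pvZPow (pvCm b) k) := by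
  fun_induction pvPowLoop p b k with
  | case1 p b => simp [pvZPow, pvZMulOne]
  | case2 p b k h ih =>
      by_cases hc : k % 2 = 1
      · simp only [dif_pos hc, if_pos hc] at ih ⊢
        rw [ih, pvCmMul, pvCmMul, pvZPowSq]
        conv_rhs => rw [show k = 1 + 2 * (k / 2) by omega]
        rw [pvZPowAdd, pvZPowOne, ← pvZMulAssoc]
      · simp only [dif_neg hc, if_neg hc] at ih ⊢
        rw [ih, pvCmMul, pvZPowSq, show 2 * (k / 2) = k by omega]

lemma pvZAppMul (x y : pvZP × pvZP × pvZP × pvZP) (v : pvZP × pvZP) :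
    pvZApp (pvZMul x y) v = pvZApp x (pvZApp y v) := by
  obtain ⟨x0, x1, x2, x3⟩ := x
  obtain ⟨y0, y1, y2, y3⟩ := y
  obtain ⟨a, b⟩ := v
  simp only [pvZApp, pvZMul, Prod.mk.injEq]
  refine ⟨?_, ?_⟩ <;> ring

lemma pvZAppPow (k : Nat) (v : pvZP × pvZP) :
    pvZApp (pvZPow (pvCm (2, 1, 1, 4)) k) v = pvZStep^[k] v := by
  induction k with
  | zero =>
      obtain ⟨a, b⟩ := v
      simp [pvZPow, pvZApp]
  | succ k ih =>
      rw [pvZPow, pvZAppMul, Function.iterate_succ_apply', ← ih]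
      obtain ⟨a, b⟩ := pvZApp (pvZPow (pvCm (2, 1, 1, 4)) k) v
      simp only [pvZApp, pvCm, pvZStep, Prod.mk.injEq]
      refine ⟨?_, ?_⟩ <;> push_cast <;> ring

lemma pvCvIter (k : Nat) (v : Int × Int) : pvCv (pvSInt^[k] v) = pvZStep^[k] (pvCv v) := by
  induction k with
  | zero => simp
  | succ k ih => rw [Function.iterate_succ_apply', Function.iterate_succ_apply', pvCvSInt, ih]

lemma pvGetLastIdx (d : List (List Int)) (hd : d ≠ []) :
    PySem.List.pyGetD d ((d.length : Int) - 1) [] = d.getLastD [] := by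
  have hlen : 0 < d.length := List.length_pos_iff.mpr hd
  rw [PySem.List.pyGetD_eq_getElem d [] (by omega) (by omega)]
  have ht : ((d.length : Int) - 1).toNat = d.length - 1 := by omega
  simp only [ht]
  rw [List.getLastD_eq_getLast?, List.getLast?_eq_getElem?]
  simp [List.getElem?_eq_getElem (show d.length - 1 < d.length by omega)]

lemma pvReadPairRow (v : Int × Int) : pvReadPair (pvPairRow v) = v := by
  simp [pvReadPair, pvPairRow, pysem]

-- one pass of A's loop body at the current end of the list
lemma pvStepRowA_end (d : List (List Int)) (hd : d ≠ []) :
    pvStepRowA d (d.length : Int) = d ++ [pvPairRow (pvSInt (pvReadPair (d.getLastD [])))] := by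
  simp only [pvStepRowA, pvPairRow, pvSInt, pvReadPair]
  rw [pvGetLastIdx d hd]

-- A's loop appends exactly the iterates of pvSInt, one row per index
lemma pvLoopA (k : Nat) : ∀ (d : List (List Int)), d ≠ [] →
    (PySem.List.pyRange ((d.length : Int)) ((d.length : Int) + (k : Int)) 1).foldl pvStepRowA d
      = d ++ (List.range k).map (fun j => pvPairRow (pvSInt^[j + 1] (pvReadPair (d.getLastD [])))) := by
  induction k with
  | zero =>
      intro d hd
      rw [show (d.length : Int) + ((0 : Nat) : Int) = (d.length : Int) by push_cast; ring]
      rw [PySem.List.pyRange_one_eq_nil le_rfl]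
      simp
  | succ k ih =>
      intro d hd
      have hlt : (d.length : Int) < (d.length : Int) + ((k + 1 : Nat) : Int) := by push_cast; omega
      rw [PySem.List.pyRange_one_cons hlt, List.foldl_cons, pvStepRowA_end d hd]
      have hne : d ++ [pvPairRow (pvSInt (pvReadPair (d.getLastD [])))] ≠ [] := by simp
      have hlen : (((d ++ [pvPairRow (pvSInt (pvReadPair (d.getLastD [])))]).length : Int))
          = (d.length : Int) + 1 := by simp
      have hrec := ih (d ++ [pvPairRow (pvSInt (pvReadPair (d.getLastD [])))]) hne
      rw [hlen, show ((d.length : Int) + 1) + (k : Int) = (d.length : Int) + ((k + 1 : Nat) : Int)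
        by push_cast; ring, List.getLastD_concat, pvReadPairRow] at hrec
      rw [hrec]
      have hit : ∀ j : Nat, pvSInt^[j + 1] (pvSInt (pvReadPair (d.getLastD [])))
          = pvSInt^[j + 1 + 1] (pvReadPair (d.getLastD [])) := fun j =>
        (Function.iterate_succ_apply pvSInt (j + 1) _).symm
      simp only [hit, List.range_succ_eq_map, List.map_cons, List.map_map, List.append_assoc,
        List.singleton_append, Function.comp_def, Nat.succ_eq_add_one]
      simp

-- ===== VERDICT (by name: the statement is the Claim_ definition above) =====
-- projections of the cast helpers (pvCm/pvZApp are defined by pattern match)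
lemma pvCm_p1 (x : Int × Int × Int × Int) : (pvCm x).1 = (x.1 : pvZP) := by
  obtain ⟨x0, x1, x2, x3⟩ := x; rfl
lemma pvCm_p2 (x : Int × Int × Int × Int) : (pvCm x).2.1 = (x.2.1 : pvZP) := by
  obtain ⟨x0, x1, x2, x3⟩ := x; rfl
lemma pvCm_p3 (x : Int × Int × Int × Int) : (pvCm x).2.2.1 = (x.2.2.1 : pvZP) := by
  obtain ⟨x0, x1, x2, x3⟩ := x; rfl
lemma pvCm_p4 (x : Int × Int × Int × Int) : (pvCm x).2.2.2 = (x.2.2.2 : pvZP) := by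
  obtain ⟨x0, x1, x2, x3⟩ := x; rfl
lemma pvZApp_p1 (x : pvZP × pvZP × pvZP × pvZP) (v : pvZP × pvZP) :
    (pvZApp x v).1 = x.1 * v.1 + x.2.1 * v.2 := by
  obtain ⟨x0, x1, x2, x3⟩ := x; obtain ⟨a, b⟩ := v; rfl
lemma pvZApp_p2 (x : pvZP × pvZP × pvZP × pvZP) (v : pvZP × pvZP) :
    (pvZApp x v).2 = x.2.2.1 * v.1 + x.2.2.2 * v.2 := by
  obtain ⟨x0, x1, x2, x3⟩ := x; obtain ⟨a, b⟩ := v; rfl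

-- B's matrix power applied to the start vector casts to the k-th iterate of the DP step
lemma pvAltCast (k : Nat) (v : Int × Int) :
    (((pvPowLoop (1, 0, 0, 1) (2, 1, 1, 4) k).1 * v.1
        + (pvPowLoop (1, 0, 0, 1) (2, 1, 1, 4) k).2.1 * v.2 : Int) : pvZP)
        = ((pvSInt^[k] v).1 : pvZP)
    ∧ (((pvPowLoop (1, 0, 0, 1) (2, 1, 1, 4) k).2.2.1 * v.1
        + (pvPowLoop (1, 0, 0, 1) (2, 1, 1, 4) k).2.2.2 * v.2 : Int) : pvZP)
        = ((pvSInt^[k] v).2 : pvZP) := by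
  have hP : pvCm (pvPowLoop (1, 0, 0, 1) (2, 1, 1, 4) k) = pvZPow (pvCm (2, 1, 1, 4)) k := by
    rw [pvPowLoopInv, show pvCm ((1 : Int), (0 : Int), (0 : Int), (1 : Int))
      = ((1 : pvZP), (0 : pvZP), (0 : pvZP), (1 : pvZP)) by simp [pvCm], pvZMulOne']
  have happ : pvZApp (pvCm (pvPowLoop (1, 0, 0, 1) (2, 1, 1, 4) k)) (pvCv v)
      = pvCv (pvSInt^[k] v) := by
    rw [hP, pvZAppPow, pvCvIter]
  constructor
  · have h1 := congrArg Prod.fst happ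
    rw [pvZApp_p1, pvCm_p1, pvCm_p2] at h1
    simpa [pvCv] using h1
  · have h2 := congrArg Prod.snd happ
    rw [pvZApp_p2, pvCm_p3, pvCm_p4] at h2
    simpa [pvCv] using h2

-- ===== VERDICT (by name: the statement is the Claim_ definition above) =====
theorem count_towers_spec : Claim_equal_count_towers := by
  intro n dp _hdom hpre
  obtain ⟨hne, _hidx, _hrow⟩ := hpre
  unfold Spec_count_towers count_towers count_towers_alt
  by_cases hb : n ≤ (dp.length : Int) - 1
  · simp only [hb, if_pos]
  · simp only [hb, if_neg, not_false_iff]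
    set k : Nat := (n - ((dp.length : Int) - 1)).toNat with hk
    have hk1 : 1 ≤ k := by omega
    have hb1 : ((dp.length : Int) - 1) + 1 = (dp.length : Int) := by ring
    have hb2 : n + 1 = (dp.length : Int) + (k : Int) := by omega
    rw [hb1, hb2, pvLoopA k dp hne]
    -- the element A finally reads is the k-th iterate row
    have hlast : PySem.List.pyGetD dp (-1) [] = dp.getLastD [] := by
      rw [PySem.List.pyGetD_neg_one dp [] hne, List.getLastD_eq_getLast?,
        List.getLast?_eq_some_getLast hne]
      rfl
    set v0 : Int × Int := pvReadPair (dp.getLastD []) with hv0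
    have hgetn : PySem.List.pyGetD
        (dp ++ (List.range k).map (fun j => pvPairRow (pvSInt^[j + 1] v0))) n []
        = pvPairRow (pvSInt^[k] v0) := by
      have hlenL : ((List.range k).map (fun j => pvPairRow (pvSInt^[j + 1] v0))).length = k := by
        simp
      rw [PySem.List.pyGetD_eq_getElem _ [] (by omega) (by simp; omega)]
      have hi : (n.toNat : Nat) = dp.length + (k - 1) := by omega
      simp only [hi]
      rw [List.getElem_append_right (by omega)]
      simp only [List.getElem_map, List.getElem_range]
      simp only [show dp.length + (k - 1) - dp.length = k - 1 by omega,
        show k - 1 + 1 = k by omega]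
    rw [hgetn, hlast]
    have hA : PySem.List.pyGetD (dp.getLastD []) 0 0 = v0.1 := rfl
    have hB : PySem.List.pyGetD (dp.getLastD []) 1 0 = v0.2 := rfl
    rw [hA, hB]
    -- both sides, componentwise, via ZMod
    obtain ⟨j, hj⟩ : ∃ j, k = j + 1 := ⟨k - 1, by omega⟩
    have hit : pvSInt^[k] v0 = pvSInt (pvSInt^[j] v0) := by
      rw [hj, Function.iterate_succ_apply']
    have hc := pvAltCast k v0
    rw [hit] at hc ⊢
    simp only [pvSInt] at hc ⊢
    have e1 := pvModEqOfCast ((hc.1.trans (pvCastMod _)) : _)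
    have e2 := pvModEqOfCast ((hc.2.trans (pvCastMod _)) : _)
    simp only [pvPairRow, List.sum_cons, List.sum_nil]
    rw [← e1, ← e2]
    ring
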